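-- pv_equiv track=rewrite | github.com/frendsick/casa | casa_ls.py | _extract_chain_before
-- ===== SOURCE A (Python) =====
-- def _extract_word_before(source: str, offset: int) -> str:
--     """Extract the identifier immediately before the given offset."""
--     end = offset
--     start = end - 1
--     while start >= 0 and (source[start].isalnum() or source[start] == "_"):
--         start -= 1
--     return source[start + 1 : end]
--
-- def _extract_chain_before(source: str, offset: int) -> list[str]:
--     """Extract a dotted chain before offset, e.g. 'test.hash' -> ['test', 'hash']."""
--     parts: list[str] = []
--     pos = offset
--     while pos > 0:
--         word = _extract_word_before(source, pos)
--         if not word: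
--             break
--         parts.append(word)
--         pos -= len(word)
--         if pos > 0 and source[pos - 1] == ".":
--             pos -= 1
--         else:
--             break
--     parts.reverse()
--     return parts
-- ===== SOURCE B (Python) =====
-- def _extract_chain_before(source: str, offset: int) -> list[str]:
--     """Single backward scan over reversed(source[:offset]) with a word buffer."""
--     if offset <= 0:
--         return []
--     parts: list[str] = []
--     buf: list[str] = []
--     for ch in reversed(source[:offset]):
--         if ch.isalnum() or ch == "_":
--             buf.append(ch)
--         elif ch == "." and buf:
--             parts.append("".join(reversed(buf)))
--             buf = []
--         else:
--             break
--     if buf: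
--         parts.append("".join(reversed(buf)))
--     parts.reverse()
--     return parts
-- ===== Notes on version B (the rewrite author's own statement) =====
-- stated objective: alternative
-- what changed: Replaced the outer loop that repeatedly calls a word-extraction helper (re-scanning and slicing for each word) with one single backward character scan over reversed(source[:offset]) that accumulates a buffer and emits parts at dots.
import Mathlib
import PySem

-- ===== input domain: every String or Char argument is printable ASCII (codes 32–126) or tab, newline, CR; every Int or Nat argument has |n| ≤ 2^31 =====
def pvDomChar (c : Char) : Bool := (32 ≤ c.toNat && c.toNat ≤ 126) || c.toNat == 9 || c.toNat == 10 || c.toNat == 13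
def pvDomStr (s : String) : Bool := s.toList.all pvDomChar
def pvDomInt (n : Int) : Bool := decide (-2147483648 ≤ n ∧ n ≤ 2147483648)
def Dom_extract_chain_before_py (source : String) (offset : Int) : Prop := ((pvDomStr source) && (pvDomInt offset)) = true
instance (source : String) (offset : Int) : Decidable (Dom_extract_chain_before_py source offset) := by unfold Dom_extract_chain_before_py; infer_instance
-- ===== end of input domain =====

-- B replaces A's outer-loop-plus-word-helper with one single backward character scan (same cost, different decomposition).

-- ===== PORT A =====
-- shared character test: source[i].isalnum() or source[i] == "_"
def pvIsIdent (c : Char) : Bool := PySem.Chars.isalnum c || c == '_'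

-- while start >= 0 and (source[start].isalnum() or source[start] == "_"): start -= 1
-- (an out-of-range read is an IndexError in Python; excluded by Pre_, here pyGet? returns none and the loop stops)
def pvFindStart (cs : List Char) (start : Int) : Int :=
  if h : 0 ≤ start ∧ ((PySem.List.pyGet? cs start).map pvIsIdent).getD false = true then
    pvFindStart cs (start - 1)
  else start
termination_by (start + 1).toNat
decreasing_by obtain ⟨h1, _⟩ := h; omega

-- _extract_word_before: end = offset; scan start down; return source[start+1:end]
def pvWordBefore (cs : List Char) (offset : Int) : List Char :=
  PySem.List.slice cs (some (pvFindStart cs (offset - 1) + 1)) (some offset)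

-- the while pos > 0 loop of _extract_chain_before
def pvChainLoop (cs : List Char) (pos : Int) (parts : List String) : List String :=
  if hp : 0 < pos then
    let word := pvWordBefore cs pos
    if word = [] then parts
    else
      if hc : 0 < pos - (word.length : Int) ∧
          PySem.List.pyGet? cs (pos - (word.length : Int) - 1) = some '.' then
        pvChainLoop cs (pos - (word.length : Int) - 1) (parts ++ [String.ofList word])
      else parts ++ [String.ofList word]
  else parts
termination_by pos.toNat
decreasing_by obtain ⟨h1, _⟩ := hc; omega

def extract_chain_before_py (source : String) (offset : Int) : List String :=
  (pvChainLoop source.toList offset []).reverse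

-- ===== PORT B =====
-- if buf: parts.append("".join(reversed(buf)))   (the code after the loop / at a break)
def pvFinish (buf : List Char) (parts : List String) : List String :=
  if buf.isEmpty then parts else parts ++ [String.ofList buf.reverse]

-- the for-loop over reversed(source[:offset]): state machine with buffer buf
def pvScan (rs : List Char) (buf : List Char) (parts : List String) : List String :=
  match rs with
  | [] => pvFinish buf parts
  | c :: rest =>
    if pvIsIdent c then pvScan rest (buf ++ [c]) parts
    else if c == '.' && !buf.isEmpty then pvScan rest [] (parts ++ [String.ofList buf.reverse])
    else pvFinish buf parts   -- break

def extract_chain_before_py_alt (source : String) (offset : Int) : List String :=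
  if offset ≤ 0 then []
  else (pvScan (PySem.List.slice source.toList none (some offset)).reverse [] []).reverse

-- ===== PRECONDITION & SPEC =====
-- Pre_ excludes exactly the inputs on which A raises IndexError (offset pointing past the end of
-- source: it reads source[offset-1] immediately); B returns the chain at the end of source there.
def Pre_extract_chain_before_py (source : String) (offset : Int) : Prop :=
  offset ≤ (source.toList.length : Int)
instance (source : String) (offset : Int) : Decidable (Pre_extract_chain_before_py source offset) := by
  unfold Pre_extract_chain_before_py; infer_instance

def pvWitness_extract_chain_before_py : String × Int := ("foo.bar", 7)

def Spec_extract_chain_before_py (source : String) (offset : Int) (out : List String) : Prop :=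
  out = extract_chain_before_py_alt source offset
instance (source : String) (offset : Int) (out : List String) : Decidable (Spec_extract_chain_before_py source offset out) := by
  unfold Spec_extract_chain_before_py; infer_instance

-- ===== CLAIM (what is proved, stated in full; the proofs are below) =====
def Claim_equal_extract_chain_before_py : Prop := ∀ (source : String) (offset : Int), Dom_extract_chain_before_py source offset → Pre_extract_chain_before_py source offset → Spec_extract_chain_before_py source offset (extract_chain_before_py source offset)

-- ===== LEMMAS AND PROOFS =====

theorem pvFindStart_bounds (cs : List Char) (k : Nat) : ∀ (start : Int), (start + 1).toNat ≤ k → -1 ≤ start →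
    -1 ≤ pvFindStart cs start ∧ pvFindStart cs start ≤ start := by
  induction k with
  | zero =>
    intro start hk h
    have hs : start = -1 := by omega
    rw [pvFindStart, dif_neg (by omega)]
    omega
  | succ k ih =>
    intro start hk h
    rw [pvFindStart]
    split
    · rename_i hcond
      have := ih (start - 1) (by omega) (by omega)
      omega
    · omega

theorem take_reverse_cons (cs : List Char) (m : Nat) (h0 : 0 < m) (h : m ≤ cs.length) :
    (cs.take m).reverse = cs[m - 1]'(by omega) :: (cs.take (m - 1)).reverse := by
  obtain ⟨j, rfl⟩ : ∃ j, m = j + 1 := ⟨m - 1, by omega⟩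
  rw [List.take_succ, List.getElem?_eq_getElem (show j < cs.length by omega)]
  simp

theorem pvWord_eq (cs : List Char) (n : Nat) (h : n ≤ cs.length) :
    pvWordBefore cs (n : Int) = ((cs.take n).reverse.takeWhile pvIsIdent).reverse := by
  induction n with
  | zero =>
    rw [pvWordBefore, pvFindStart, dif_neg (by omega)]
    norm_num
    rw [PySem.List.slice_to _ (by omega)]
    simp
  | succ n ih =>
    have hn : n < cs.length := by omega
    have hget : PySem.List.pyGet? cs ((n : Int)) = some cs[n] := by
      rw [PySem.List.pyGet?_natCast]
      exact List.getElem?_eq_getElem hn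
    have hstep : ((n + 1 : Nat) : Int) - 1 = (n : Int) := by push_cast; ring
    by_cases hid : pvIsIdent cs[n] = true
    · -- identifier char: one more unfold of the scan
      have hfs : pvFindStart cs (((n + 1 : Nat) : Int) - 1) = pvFindStart cs ((n : Int) - 1) := by
        rw [hstep, pvFindStart, dif_pos ⟨by omega, by rw [hget]; simpa using hid⟩]
      have hb := pvFindStart_bounds cs ((n : Int)).toNat ((n : Int) - 1) (by omega) (by omega)
      set s := pvFindStart cs ((n : Int) - 1) with hsdef
      obtain ⟨a, ha⟩ : ∃ a : Nat, s + 1 = (a : Int) := ⟨(s + 1).toNat, by omega⟩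
      have han : a ≤ n := by omega
      rw [pvWordBefore, hfs, ha, PySem.List.slice_toNat _ (by omega) (by omega)]
      rw [pvWordBefore, ha, PySem.List.slice_toNat _ (by omega) (by omega)] at ih
      have ih := ih (by omega)
      rw [take_reverse_cons cs (n + 1) (by omega) (by omega)]
      rw [List.takeWhile_cons_of_pos (by simpa using hid)]
      simp only [List.reverse_cons, Nat.add_sub_cancel]
      rw [← ih]
      have h1 : ((n : Int) : Int).toNat = n := by omega
      have h2 : (((n + 1 : Nat) : Int)).toNat = n + 1 := by omega
      have h3 : ((a : Int)).toNat = a := by omega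
      rw [h1] at ih ⊢
      rw [h3] at ih ⊢
      rw [show (((n + 1 : Nat) : Int)).toNat = n + 1 by omega]
      rw [show n + 1 - a = (n - a) + 1 by omega]
      rw [List.take_succ]
      congr 1
      rw [List.getElem?_drop]
      rw [show a + (n - a) = n by omega]
      simp [List.getElem?_eq_getElem hn]
    · -- non-identifier char: the scan stops immediately
      have hfs : pvFindStart cs (((n + 1 : Nat) : Int) - 1) = (n : Int) := by
        rw [hstep, pvFindStart, dif_neg]
        intro hc
        rw [hget] at hc
        exact hid (by simpa using hc.2)
      rw [pvWordBefore, hfs, PySem.List.slice_toNat _ (by omega) (by omega)]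
      rw [take_reverse_cons cs (n + 1) (by omega) (by omega)]
      rw [List.takeWhile_cons_of_neg (by simpa using hid)]
      simp

theorem pvScan_consume (u : List Char) (t : List Char) (buf : List Char) (parts : List String)
    (hu : ∀ c ∈ u, pvIsIdent c = true) :
    pvScan (u ++ t) buf parts = pvScan t (buf ++ u) parts := by
  induction u generalizing buf with
  | nil => simp
  | cons c u ih =>
    have hc : pvIsIdent c = true := hu c (by simp)
    simp only [List.cons_append, pvScan, hc, if_pos]
    rw [ih (buf ++ [c]) (fun d hd => hu d (by simp [hd]))]
    simp

theorem rev_take_drop (cs : List Char) (n k : Nat) (h : n ≤ cs.length) (hk : k ≤ n) :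
    ((cs.take n).reverse).drop k = (cs.take (n - k)).reverse := by
  rw [List.drop_reverse]
  congr 1
  rw [List.take_take, List.length_take]
  congr 1
  omega

theorem pvChain_eq_scan (cs : List Char) : ∀ (n : Nat), n ≤ cs.length → ∀ (parts : List String),
    pvChainLoop cs (n : Int) parts = pvScan (cs.take n).reverse [] parts := by
  intro n
  induction n using Nat.strong_induction_on with
  | _ n ih =>
    intro h parts
    rcases Nat.eq_zero_or_pos n with hz | hpos
    · subst hz
      rw [pvChainLoop, dif_neg (by omega)]
      simp [pvScan, pvFinish]
    · rw [pvChainLoop, dif_pos (by omega : (0 : Int) < (n : Int))]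
      simp only [pvWord_eq cs n h]
      set rs := (cs.take n).reverse with hrs
      have hrslen : rs.length = n := by simp [hrs]; omega
      set w := rs.takeWhile pvIsIdent with hw
      by_cases hwnil : w = []
      · -- first word empty: A returns parts; B breaks at once
        rw [if_pos (by simp [hwnil])]
        have hcons := take_reverse_cons cs n hpos h
        rw [← hrs] at hcons
        have hhead : pvIsIdent (cs[n-1]'(by omega)) = false := by
          by_contra hcontra
          rw [Bool.not_eq_false] at hcontra
          rw [hcons, List.takeWhile_cons_of_pos hcontra] at hw
          rw [hw] at hwnil
          exact List.cons_ne_nil _ _ hwnil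
        rw [hcons, pvScan, if_neg (by simp [hhead]), if_neg (by simp), pvFinish]
        simp
      · -- nonempty word
        rw [if_neg (by simp [hwnil])]
        have hklen : w.length ≤ n := by
          have := (List.takeWhile_sublist (p := pvIsIdent) (l := rs)).length_le
          rw [← hw] at this; omega
        have hkpos : 0 < w.length := List.length_pos_iff.mpr hwnil
        -- B side: consume the word
        have hsplit : rs = w ++ rs.dropWhile pvIsIdent := by
          rw [hw]; exact (List.takeWhile_append_dropWhile).symm
        have hBleft : pvScan rs [] parts =
            pvScan (rs.dropWhile pvIsIdent) w parts := by
          conv_lhs => rw [hsplit]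
          rw [pvScan_consume _ _ _ _ (fun c hc => List.mem_takeWhile_imp hc)]
          rw [List.nil_append, ← hw]
        -- the rest of the scan is the reversed shorter prefix
        have hrest : rs.dropWhile pvIsIdent = (cs.take (n - w.length)).reverse := by
          have hdrop : rs.drop w.length = rs.dropWhile pvIsIdent := by
            conv_lhs => rw [hsplit]
            exact List.drop_left
          rw [← hdrop, hrs]
          exact rev_take_drop cs n w.length h hklen
        have hlenrev : ((w.reverse).length : Int) = (w.length : Int) := by simp
        rcases Nat.eq_zero_or_pos (n - w.length) with hz2 | hpos2
        · -- word reaches the start of the string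
          have hrest0 : rs.dropWhile pvIsIdent = [] := by rw [hrest, hz2]; simp
          rw [dif_neg (fun hc => absurd hc.1 (by simp only [List.length_reverse]; omega))]
          rw [hBleft, hrest0, pvScan, pvFinish, if_neg (by simp [hwnil])]
        · -- characters remain before the word: check for a dot
          have hcons2 := take_reverse_cons cs (n - w.length) hpos2 (by omega)
          have hgetdot : PySem.List.pyGet? cs ((n : Int) - ((w.reverse).length : Int) - 1) =
              some (cs[n - w.length - 1]'(by omega)) := by
            rw [hlenrev, show (n : Int) - (w.length : Int) - 1 = ((n - w.length - 1 : Nat) : Int) by omega]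
            exact PySem.List.pyGet?_ofNat cs (n - w.length - 1) (by omega)
          by_cases hdot : cs[n - w.length - 1]'(by omega) = '.'
          · -- dot: both continue
            rw [dif_pos ⟨by simp only [List.length_reverse]; omega, by rw [hgetdot, hdot]⟩]
            rw [hBleft, hrest, hcons2, pvScan, if_neg (by rw [hdot]; decide),
              if_pos (by simp [hdot, hwnil])]
            have hcast : (n : Int) - ((w.reverse).length : Int) - 1 = ((n - w.length - 1 : Nat) : Int) := by
              rw [hlenrev]; omega
            rw [hcast, ih (n - w.length - 1) (by omega) (by omega)]
          · -- no dot: both stop after this word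
            rw [dif_neg (fun hc => hdot (by have := hc.2; rw [hgetdot] at this; simpa using this))]
            rw [hBleft, hrest, hcons2, pvScan]
            have hheadid : pvIsIdent (cs[n - w.length - 1]'(by omega)) = false := by
              have hd : rs.dropWhile pvIsIdent =
                  cs[n - w.length - 1]'(by omega) :: (cs.take (n - w.length - 1)).reverse :=
                hrest.trans hcons2
              have hne : rs.dropWhile pvIsIdent ≠ [] := by rw [hd]; simp
              have h2 := List.head_dropWhile_not pvIsIdent hne
              simp only [hd, List.head_cons] at h2
              exact h2
            rw [if_neg (by simp [hheadid]), if_neg (by simp [hdot]), pvFinish,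
              if_neg (by simp [hwnil])]

-- ===== VERDICT (by name: the statement is the Claim_ definition above) =====
theorem extract_chain_before_py_spec : Claim_equal_extract_chain_before_py := by
  intro source offset _ hpre
  unfold Pre_extract_chain_before_py at hpre
  unfold Spec_extract_chain_before_py extract_chain_before_py extract_chain_before_py_alt
  by_cases h0 : offset ≤ 0
  · rw [if_pos h0, pvChainLoop, dif_neg (by omega)]
    simp
  · rw [if_neg h0, PySem.List.slice_to _ (by omega)]
    rw [show offset = ((offset.toNat : Nat) : Int) by omega]
    rw [pvChain_eq_scan source.toList offset.toNat (by omega) [], Int.toNat_natCast]
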